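-- pv_equiv track=rewrite | github.com/AdamZhouSE/pythonHomework | Code/CodeRecords/2662/60657/257829.py | find
-- ===== SOURCE A (Python) =====
-- def find(a):
--     temp=bin(a)
--     temp=list(temp)
--     odd=0
--     for i in range(2,len(temp)):
--         if temp[i]=='1' :
--             odd+=1
--     if odd%2==0:
--         return True
--     return False
-- ===== SOURCE B (Python) =====
-- def find(a):
--     n = abs(a)
--     odd = 0
--     while n:
--         odd ^= n & 1
--         n >>= 1
--     return odd == 0
-- ===== Notes on version B (the rewrite author's own statement) =====
-- stated objective: idiomatic
-- what changed: Replaces building bin(a)'s character list and scanning its indices for '1' chars with an arithmetic bit loop that toggles a parity flag while shifting abs(a) right.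
import Mathlib
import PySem

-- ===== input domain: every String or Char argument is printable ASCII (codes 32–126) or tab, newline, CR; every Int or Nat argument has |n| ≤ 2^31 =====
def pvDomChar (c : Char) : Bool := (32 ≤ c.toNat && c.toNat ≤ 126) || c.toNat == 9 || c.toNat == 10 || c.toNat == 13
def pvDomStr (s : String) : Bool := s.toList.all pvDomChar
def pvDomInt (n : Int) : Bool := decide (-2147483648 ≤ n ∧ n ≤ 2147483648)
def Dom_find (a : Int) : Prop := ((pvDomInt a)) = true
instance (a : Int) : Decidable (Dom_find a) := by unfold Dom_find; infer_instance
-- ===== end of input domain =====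

-- B replaces bin(a)-string scanning with an arithmetic parity bit loop on abs(a); more idiomatic, same cost.


-- ===== PORT A =====
-- binary-digit characters of a positive Nat, exactly the digit part of Python's bin()
def pvBinChars (n : Nat) : List Char :=
  if h : n = 0 then [] else pvBinChars (n / 2) ++ [if n % 2 = 1 then '1' else '0']
decreasing_by exact Nat.div_lt_self (Nat.pos_of_ne_zero h) (by norm_num)

def find (a : Int) : Bool :=
  -- temp = list(bin(a)): sign, "0b", then the binary digits of |a| (hand port, exact)
  let temp : List Char :=
    (if a < 0 then ['-'] else []) ++ ['0', 'b'] ++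
      (if a = 0 then ['0'] else pvBinChars a.natAbs)
  let odd : Int :=
    (PySem.List.pyRange 2 (temp.length : Int) 1).foldl
      (fun odd i => if PySem.List.pyGetD temp i ' ' = '1' then odd + 1 else odd) 0
  if odd % 2 = 0 then true else false

-- ===== PORT B =====
def pvParityLoop (n : Nat) (odd : Bool) : Bool :=
  if h : n = 0 then odd else pvParityLoop (n / 2) (odd ^^ decide (n % 2 = 1))
decreasing_by exact Nat.div_lt_self (Nat.pos_of_ne_zero h) (by norm_num)

def find_alt (a : Int) : Bool := !(pvParityLoop a.natAbs false)

-- ===== PRECONDITION & SPEC =====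
def Spec_find (a : Int) (out : Bool) : Prop := out = find_alt a
instance (a : Int) (out : Bool) : Decidable (Spec_find a out) := by unfold Spec_find; infer_instance

-- ===== CLAIM (what is proved, stated in full; the proofs are below) =====
def Claim_equal_find : Prop := ∀ (a : Int), Dom_find a → Spec_find a (find a)

-- ===== LEMMAS AND PROOFS =====

theorem pvParityLoop_eq (n : Nat) : ∀ odd : Bool,
    pvParityLoop n odd = (odd ^^ decide ((pvBinChars n).count '1' % 2 = 1)) := by
  induction n using Nat.strong_induction_on with
  | _ n ih =>
    intro odd
    by_cases h : n = 0
    · subst h; simp [pvParityLoop, pvBinChars]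
    · rw [pvParityLoop, dif_neg h, ih (n / 2) (Nat.div_lt_self (Nat.pos_of_ne_zero h) (by norm_num))]
      conv_rhs => rw [pvBinChars, dif_neg h]
      have h2 : n % 2 = 0 ∨ n % 2 = 1 := Nat.mod_two_eq_zero_or_one n
      rcases h2 with h2 | h2 <;> simp [h2, List.count_append] <;>
        rcases Nat.mod_two_eq_zero_or_one ((pvBinChars (n / 2)).count '1') with h3 | h3 <;>
        simp [h3, Nat.add_mod]

theorem count_foldl (xs : List Char) : ∀ init : Int,
    xs.foldl (fun acc v => if v = '1' then acc + 1 else acc) init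
      = init + (xs.count '1' : Int) := by
  induction xs with
  | nil => intro init; simp
  | cons x t ih =>
    intro init
    by_cases h : x = '1' <;> simp [List.count_cons, h, ih] <;> ring

theorem find_spec : Claim_equal_find := by
  intro a _
  unfold Spec_find find find_alt
  set digits : List Char := if a = 0 then ['0'] else pvBinChars a.natAbs with hd
  set temp : List Char := (if a < 0 then ['-'] else []) ++ ['0', 'b'] ++ digits with ht
  have hfold := PySem.List.foldl_pyRange_pyGetD' (xs := temp) (d := ' ')
    (f := fun acc v => if v = '1' then acc + 1 else acc) (init := (0 : Int)) (a := 2)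
    (by norm_num)
  simp only [hfold]
  have hdrop : (temp.drop (2 : Int).toNat).count '1' = digits.count '1' := by
    by_cases h : a < 0 <;> simp [ht, h, List.count_cons]
  rw [count_foldl, hdrop]
  have hcnt : digits.count '1' = (pvBinChars a.natAbs).count '1' := by
    by_cases h : a = 0
    · subst h
      have h0 : pvBinChars 0 = [] := by rw [pvBinChars]; rfl
      simp [hd, h0]
    · simp [hd, h]
  rw [hcnt]
  rw [pvParityLoop_eq]
  rcases Nat.mod_two_eq_zero_or_one ((pvBinChars a.natAbs).count '1') with h3 | h3 <;>
    simp [h3] <;> omega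

-- ===== VERDICT (by name: the statement is the Claim_ definition above) =====
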